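-- pv_equiv track=rewrite | github.com/PraderioM/GamePlatform | backend/games/sudoku/endpoints/create_sudoku.py | permute_sudoku_blocks_vertically
-- ===== SOURCE A (Python) =====
-- from typing import List
--
-- def permute_sudoku_blocks_vertically(table: List[List[int]], permutation: List[int]) -> List[List[int]]:
--     # Setup.
--     height = len(table)
--     width = len(table[0])
--     n_blocks = len(permutation)
--     block_length = int(height / n_blocks)
--     out_table = [row[:] for row in table]
--
--     # Permutation.
--     for dst_index, src_index in enumerate(permutation):
--         for row in range(block_length):
--             dst_row = dst_index * block_length + row
--             src_row = src_index * block_length + row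
--             for col in range(width):
--                 out_table[dst_row][col] = table[src_row][col]
--
--     return out_table
-- ===== SOURCE B (Python) =====
-- from typing import List
--
-- def permute_sudoku_blocks_vertically(table: List[List[int]], permutation: List[int]) -> List[List[int]]:
--     n_blocks = len(permutation)
--     block_length = int(len(table) / n_blocks)
--     out = []
--     for src_index in permutation:
--         for row in range(src_index * block_length, (src_index + 1) * block_length):
--             out.append(table[row][:])
--     for row in range(n_blocks * block_length, len(table)):
--         out.append(table[row][:])
--     return out
-- ===== Notes on version B (the rewrite author's own statement) =====
-- stated objective: simpler
-- what changed: B builds the output directly by appending whole copied rows of each selected block (one row-index range per permutation entry, plus the untouched trailing rows), instead of pre-copying the table and overwriting each cell with nested dst/src row-and-column index arithmetic.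
-- outside the precondition, e.g. on permute_sudoku_blocks_vertically([[1], [2, 9]], [1, 0]): A returns [[2], [1, 9]], B returns [[2, 9], [1]]
import Mathlib
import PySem

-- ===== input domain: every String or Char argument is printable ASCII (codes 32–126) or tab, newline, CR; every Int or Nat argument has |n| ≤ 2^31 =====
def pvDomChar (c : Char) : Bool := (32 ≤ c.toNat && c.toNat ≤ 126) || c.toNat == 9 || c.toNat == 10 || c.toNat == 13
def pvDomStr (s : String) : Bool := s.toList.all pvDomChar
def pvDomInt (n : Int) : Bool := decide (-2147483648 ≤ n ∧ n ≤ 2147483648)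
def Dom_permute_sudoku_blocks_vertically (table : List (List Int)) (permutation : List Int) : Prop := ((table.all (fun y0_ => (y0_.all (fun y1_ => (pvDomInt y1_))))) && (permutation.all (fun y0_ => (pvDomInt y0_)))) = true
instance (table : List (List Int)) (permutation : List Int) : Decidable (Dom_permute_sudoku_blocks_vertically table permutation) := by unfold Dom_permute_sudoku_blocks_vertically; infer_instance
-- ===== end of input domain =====

-- B rebuilds the output by concatenating whole sliced blocks instead of overwriting a
-- copied table cell by cell (objective: simpler decomposition; same asymptotic cost).

-- ===== PORT A =====
-- out_table[r][c] = v  (Python raises if out of range; Pre_ keeps every write in range,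
-- where List.modify/List.set are exact)
def pvSetCell (t : List (List Int)) (r c : Nat) (v : Int) : List (List Int) :=
  t.modify r (fun rowv => rowv.set c v)

-- inner loop: for col in range(width): out_table[dst_row][col] = table[src_row][col]
def pvWriteCells (table : List (List Int)) (w : Nat) (srcRow : Int) (dstRow : Nat)
    (out : List (List Int)) : List (List Int) :=
  (List.range w).foldl
    (fun out col =>
      pvSetCell out dstRow col
        (PySem.List.pyGetD (PySem.List.pyGetD table srcRow []) (col : Int) 0)) out

-- middle loop: for row in range(block_length): …
def pvBlockStep (table : List (List Int)) (bl w dst : Nat) (src : Int)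
    (out : List (List Int)) : List (List Int) :=
  (List.range bl).foldl
    (fun (out : List (List Int)) (row : Nat) =>
      pvWriteCells table w (src * (bl : Int) + (row : Int)) (dst * bl + row) out)
    out

-- outer loop: for dst_index, src_index in enumerate(permutation): …
def pvALoop (table : List (List Int)) (bl w : Nat) :
    List Int → Nat → List (List Int) → List (List Int)
  | [], _, out => out
  | src :: rest, dst, out => pvALoop table bl w rest (dst + 1) (pvBlockStep table bl w dst src out)

def permute_sudoku_blocks_vertically (table : List (List Int)) (permutation : List Int) : List (List Int) :=
  let height := table.length
  let width := (PySem.List.pyGetD table (0 : Int) []).length  -- table[0]; IndexError on [] is outside Pre_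
  let n_blocks := permutation.length
  -- int(height / n_blocks): exact Nat floor division for the list sizes at hand (n_blocks = 0 raises, outside Pre_)
  let block_length := height / n_blocks
  let out_table := table.map (fun row => row)                 -- [row[:] for row in table]
  pvALoop table block_length width permutation 0 out_table

-- ===== PORT B =====
def permute_sudoku_blocks_vertically_alt (table : List (List Int)) (permutation : List Int) : List (List Int) :=
  let n_blocks := permutation.length
  let block_length := table.length / n_blocks
  let out := permutation.foldl (fun out src =>
    (PySem.List.pyRange (src * (block_length : Int)) ((src + 1) * (block_length : Int))).foldl
      (fun out row => out ++ [PySem.List.pyGetD table (row : Int) []]) out) []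
  (PySem.List.pyRange ((n_blocks : Int) * (block_length : Int)) (PySem.List.len table)).foldl
    (fun out row => out ++ [PySem.List.pyGetD table (row : Int) []]) out

-- ===== PRECONDITION & SPEC =====
-- Pre_ is the function's natural domain: a nonempty table, a nonempty permutation and,
-- when block_length = height / n_blocks is positive, a rectangular table (a sudoku table
-- always is) and permutation entries each selecting (via Python's negative-index
-- wraparound for negative entries) a block of rows lying inside the table.  Outside it
-- A raises (empty table: IndexError; empty permutation: ZeroDivisionError; entries whose
-- block reaches outside the table / ragged rows shorter than row 0: IndexError) or the
-- table is not rectangular, a corner no caller specifies, on which A copies only the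
-- first len(row 0) cells of each moved row while B copies whole rows.
def Pre_permute_sudoku_blocks_vertically (table : List (List Int)) (permutation : List Int) : Prop :=
  table ≠ [] ∧ permutation ≠ [] ∧
  (table.length / permutation.length = 0 ∨
    ((∀ row ∈ table, row.length = (table.headD []).length) ∧
     ∀ src ∈ permutation,
       (0 ≤ src ∧ (src.toNat + 1) * (table.length / permutation.length) ≤ table.length) ∨
       (src < 0 ∧ 0 ≤ (table.length : Int)
          + src * ((table.length / permutation.length : Nat) : Int))))
instance (table : List (List Int)) (permutation : List Int) : Decidable (Pre_permute_sudoku_blocks_vertically table permutation) := by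
  unfold Pre_permute_sudoku_blocks_vertically; infer_instance

def pvWitness_permute_sudoku_blocks_vertically : List (List Int) × List Int :=
  ([[1, 2], [3, 4]], [1, 0])

def Spec_permute_sudoku_blocks_vertically (table : List (List Int)) (permutation : List Int) (out : List (List Int)) : Prop := out = permute_sudoku_blocks_vertically_alt table permutation
instance (table : List (List Int)) (permutation : List Int) (out : List (List Int)) : Decidable (Spec_permute_sudoku_blocks_vertically table permutation out) := by unfold Spec_permute_sudoku_blocks_vertically; infer_instance

-- ===== CLAIM (what is proved, stated in full; the proofs are below) =====
def Claim_equal_permute_sudoku_blocks_vertically : Prop := ∀ (table : List (List Int)) (permutation : List Int), Dom_permute_sudoku_blocks_vertically table permutation → Pre_permute_sudoku_blocks_vertically table permutation → Spec_permute_sudoku_blocks_vertically table permutation (permute_sudoku_blocks_vertically table permutation)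

-- ===== LEMMAS AND PROOFS =====

-- Overwriting the first k cells of a row with the first k cells of b.
theorem pv_fold_set (a b : List Int) (k : Nat) (ha : k ≤ a.length) (hb : k ≤ b.length) :
    (List.range k).foldl (fun rv c => rv.set c (b.getD c 0)) a = b.take k ++ a.drop k := by
  induction k with
  | zero => simp
  | succ k ih =>
    rw [List.range_succ, List.foldl_append, ih (by omega) (by omega)]
    have hk : k < b.length := by omega
    have hka : k < a.length := by omega
    have hlen : (b.take k).length = k := by simp; omega
    rw [List.foldl_cons, List.foldl_nil, List.set_append_right _ _ (by omega), hlen,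
        Nat.sub_self, List.drop_eq_getElem_cons hka, List.set_cons_zero,
        List.getD_eq_getElem?_getD, List.getElem?_eq_getElem hk, Option.getD_some,
        List.take_succ, List.getElem?_eq_getElem hk, Option.toList_some,
        List.append_assoc, List.singleton_append]

-- modify with the identity is the identity (no Mathlib lemma found by exact?)
theorem pv_modify_id {α : Type} (t : List α) (r : Nat) : t.modify r (fun a => a) = t := by
  induction t generalizing r with
  | nil => simp
  | cons x xs ih =>
    cases r with
    | zero => rfl
    | succ r => simpa using ih r

-- A fold of modifications of the same row is one modification by the folded function.
theorem pv_foldl_modify (ls : List Nat) (t : List (List Int)) (r : Nat)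
    (f : List Int → Nat → List Int) :
    ls.foldl (fun out c => out.modify r (fun rv => f rv c)) t
      = t.modify r (fun rv => ls.foldl f rv) := by
  induction ls generalizing t with
  | nil => simp [pv_modify_id]
  | cons c rest ih =>
    rw [List.foldl_cons, ih, List.modify_modify_eq]
    rfl

-- The row of the table a permutation entry's block starts at (entries < 0 select
-- Python-style from the end).
def pvStart (h bl : Nat) (s : Int) : Nat :=
  if 0 ≤ s then s.toNat * bl else ((h : Int) + s * (bl : Int)).toNat

-- An admitted entry's block lies inside the table, and each of its reads lands on
-- row pvStart + row.
theorem pv_start_spec (table : List (List Int)) (bl : Nat) (s : Int)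
    (hdisj : (0 ≤ s ∧ (s.toNat + 1) * bl ≤ table.length) ∨
      (s < 0 ∧ 0 ≤ (table.length : Int) + s * (bl : Int))) :
    pvStart table.length bl s + bl ≤ table.length ∧
    ∀ row : Nat, row < bl → PySem.List.pyGetD table (s * (bl : Int) + (row : Int)) []
      = table.getD (pvStart table.length bl s + row) [] := by
  rcases hdisj with ⟨h0, hub⟩ | ⟨hneg, hwrap⟩
  · have hst : pvStart table.length bl s = s.toNat * bl := by
      unfold pvStart; rw [if_pos h0]
    obtain ⟨m, rfl⟩ := Int.eq_ofNat_of_zero_le h0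
    simp only [Int.toNat_natCast] at hub hst
    have hexp : (m + 1) * bl = m * bl + bl := by ring
    refine ⟨by omega, ?_⟩
    intro row hrow
    have hidx : ((m : Int) * (bl : Int) + (row : Int)) = ((m * bl + row : Nat) : Int) := by
      push_cast; ring
    rw [hst, hidx, PySem.List.pyGetD_natCast]
  · have hX : s * (bl : Int) ≤ -(bl : Int) := by
      have := mul_le_mul_of_nonneg_right (show s ≤ -1 by omega)
        (show (0 : Int) ≤ (bl : Int) by positivity)
      simpa using this
    have hst : pvStart table.length bl s = ((table.length : Int) + s * (bl : Int)).toNat := by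
      unfold pvStart; rw [if_neg (by omega)]
    refine ⟨by omega, ?_⟩
    intro row hrow
    have hrow' : (row : Int) < (bl : Int) := by exact_mod_cast hrow
    have hneg_i : s * (bl : Int) + (row : Int) < 0 := by omega
    have hk1 : 0 < (-(s * (bl : Int) + (row : Int))).toNat := by omega
    have hk2 : (-(s * (bl : Int) + (row : Int))).toNat ≤ table.length := by omega
    have hieq : s * (bl : Int) + (row : Int)
        = -(((-(s * (bl : Int) + (row : Int))).toNat : Nat) : Int) := by omega
    rw [hieq, PySem.List.pyGetD_neg_natCast table _ [] hk1 hk2]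
    have hlt : table.length - (-(s * (bl : Int) + (row : Int))).toNat < table.length := by omega
    have hidx : table.length - (-(s * (bl : Int) + (row : Int))).toNat
        = pvStart table.length bl s + row := by rw [hst]; omega
    rw [List.getD_eq_getElem table [] (by omega)]
    exact getElem_congr rfl hidx (by omega)

-- One inner loop replaces row j of (pref ++ table.drop j) by the read row.
theorem pv_write_row (table pref : List (List Int)) (w : Nat)
    (hw : ∀ r ∈ table, r.length = w) (j : Nat) (hj : j < table.length)
    (hpref : pref.length = j) (src : Int) (i : Nat) (hi : i < table.length)
    (hget : PySem.List.pyGetD table src [] = table.getD i []) :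
    pvWriteCells table w src j (pref ++ table.drop j)
      = pref ++ table.getD i [] :: table.drop (j + 1) := by
  unfold pvWriteCells pvSetCell
  rw [pv_foldl_modify]
  have hgetj : (pref ++ table.drop j)[j]? = some table[j] := by
    rw [List.getElem?_append_right (by omega), hpref, Nat.sub_self,
      List.drop_eq_getElem_cons hj]
    rfl
  rw [List.modify_eq_set, hgetj]
  have hfold : (List.range w).foldl (fun rv c => rv.set c (PySem.List.pyGetD (PySem.List.pyGetD table src []) (c : Int) 0)) table[j]
      = table.getD i [] := by
    have h1 : (table[j] : List Int).length = w := hw _ (by simp)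
    have h2 : (table.getD i []).length = w := by
      rw [List.getD_eq_getElem table [] hi]
      exact hw _ (by simp)
    calc (List.range w).foldl (fun rv c => rv.set c (PySem.List.pyGetD (PySem.List.pyGetD table src []) (c : Int) 0)) table[j]
        = (List.range w).foldl (fun rv c => rv.set c ((table.getD i []).getD c 0)) table[j] := by
          simp [hget, PySem.List.pyGetD_natCast]
      _ = (table.getD i []).take w ++ table[j].drop w :=
          pv_fold_set table[j] (table.getD i []) w (by omega) (by omega)
      _ = table.getD i [] := by
          have hd : (table[j] : List Int).drop w = [] := by rw [← h1]; simp
          rw [hd, List.append_nil, ← h2, List.take_length]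
  rw [Option.getD_some, hfold, List.set_append_right _ _ (by omega), hpref, Nat.sub_self,
    List.drop_eq_getElem_cons hj, List.set_cons_zero]

-- One middle loop replaces block dst of the remaining table by the block read at st.
theorem pv_block (table : List (List Int)) (bl w dst : Nat)
    (hw : ∀ r ∈ table, r.length = w) (s : Int) (st : Nat)
    (hst : st + bl ≤ table.length)
    (hred : ∀ row : Nat, row < bl →
      PySem.List.pyGetD table (s * (bl : Int) + (row : Int)) [] = table.getD (st + row) [])
    (hdst : (dst + 1) * bl ≤ table.length) :
    ∀ (k : Nat), k ≤ bl → ∀ (pref : List (List Int)), pref.length = dst * bl →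
    (List.range k).foldl
        (fun (out : List (List Int)) (row : Nat) =>
          pvWriteCells table w (s * (bl : Int) + (row : Int)) (dst * bl + row) out)
        (pref ++ table.drop (dst * bl))
      = (pref ++ ((table.drop st).take k)) ++ table.drop (dst * bl + k) := by
  intro k
  induction k with
  | zero => intro _ pref hpref; simp
  | succ k ih =>
    intro hk pref hpref
    rw [List.range_succ, List.foldl_append, ih (by omega) pref hpref, List.foldl_cons,
      List.foldl_nil]
    have hsk : st + k < table.length := by omega
    have hexp2 : (dst + 1) * bl = dst * bl + bl := by ring
    have hlenpref : (pref ++ (table.drop st).take k).length = dst * bl + k := by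
      rw [List.length_append, hpref, List.length_take, List.length_drop]
      omega
    have hwr := pv_write_row table (pref ++ (table.drop st).take k) w hw
      (dst * bl + k) (by omega) hlenpref (s * (bl : Int) + (k : Int)) (st + k) hsk
      (hred k (by omega))
    rw [hwr]
    have hdropk : (table.drop st).take (k + 1)
        = (table.drop st).take k ++ [table[st + k]] := by
      rw [List.take_succ, List.getElem?_drop, List.getElem?_eq_getElem hsk]
      rfl
    rw [hdropk, List.getD_eq_getElem table [] hsk]
    simp [List.append_assoc]
    omega

-- The outer loop turns (pref ++ rest-of-table) into pref ++ permuted blocks ++ trailing rows.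
theorem pv_loop (table : List (List Int)) (bl w : Nat) (hw : ∀ r ∈ table, r.length = w) :
    ∀ (perm : List Int) (dst : Nat) (pref : List (List Int)), pref.length = dst * bl →
    (dst + perm.length) * bl ≤ table.length →
    (∀ s ∈ perm, pvStart table.length bl s + bl ≤ table.length) →
    (∀ s ∈ perm, ∀ row : Nat, row < bl →
      PySem.List.pyGetD table (s * (bl : Int) + (row : Int)) []
        = table.getD (pvStart table.length bl s + row) []) →
    pvALoop table bl w perm dst (pref ++ table.drop (dst * bl))
      = pref ++ perm.flatMap (fun s => (table.drop (pvStart table.length bl s)).take bl)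
          ++ table.drop ((dst + perm.length) * bl) := by
  intro perm
  induction perm with
  | nil => intro dst pref hpref _ _ _; simp [pvALoop]
  | cons s rest ih =>
    intro dst pref hpref hbound hall hredall
    have hsb := hall s (by simp)
    have hdst1 : (dst + 1) * bl ≤ table.length := by
      have : (dst + 1) ≤ dst + (s :: rest).length := by simp
      calc (dst + 1) * bl ≤ (dst + (s :: rest).length) * bl := Nat.mul_le_mul_right bl this
        _ ≤ table.length := hbound
    have hblk := pv_block table bl w dst hw s (pvStart table.length bl s) hsb
      (hredall s (by simp)) hdst1 bl (Nat.le_refl bl) pref hpref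
    have hblklen : ((table.drop (pvStart table.length bl s)).take bl).length = bl := by
      rw [List.length_take, List.length_drop]
      omega
    rw [pvALoop, pvBlockStep, hblk]
    have hrw : dst * bl + bl = (dst + 1) * bl := by ring
    rw [hrw, ih (dst + 1) (pref ++ (table.drop (pvStart table.length bl s)).take bl)
      (by simp [hpref, hblklen]; ring)
      (by simpa [Nat.add_comm, Nat.add_assoc, Nat.add_left_comm] using hbound)
      (fun x hx => hall x (by simp [hx]))
      (fun x hx => hredall x (by simp [hx]))]
    have : dst + 1 + rest.length = dst + (s :: rest).length := by simp; omega
    rw [this]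
    simp [List.append_assoc]

-- B's row loop over range(a, a+k) for a negative start collects the wrapped block.
theorem pv_map_range_neg (table : List (List Int)) :
    ∀ (k : Nat) (a : Int), a + (k : Int) ≤ 0 → 0 ≤ (table.length : Int) + a →
    (PySem.List.pyRange a (a + (k : Int))).map (fun j => PySem.List.pyGetD table j [])
      = (table.drop (((table.length : Int) + a).toNat)).take k := by
  intro k
  induction k with
  | zero =>
    intro a h1 h2
    have he : a + ((0 : Nat) : Int) = a := by push_cast; ring
    rw [he]
    have hr : PySem.List.pyRange a a = [] := by simp [PySem.List.pyRange]
    rw [hr]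
    simp
  | succ k ih =>
    intro a h1 h2
    push_cast at h1
    have hlt : a < a + (((k : Nat) + 1 : Nat) : Int) := by push_cast; omega
    rw [PySem.List.pyRange_one_cons hlt, List.map_cons]
    have ha0 : a < 0 := by omega
    have hk1 : 0 < (-a).toNat := by omega
    have hk2 : (-a).toNat ≤ table.length := by omega
    have hga := PySem.List.pyGetD_neg_natCast table ((-a).toNat) ([] : List Int) hk1 hk2
    rw [show -(((-a).toNat : Nat) : Int) = a from by omega] at hga
    rw [hga]
    have harg : a + (((k : Nat) + 1 : Nat) : Int) = (a + 1) + (k : Int) := by push_cast; ring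
    rw [harg, ih (a + 1) (by omega) (by omega)]
    have hN : ((table.length : Int) + a).toNat < table.length := by omega
    have h5 : table.length - (-a).toNat = ((table.length : Int) + a).toNat := by omega
    have h6 : ((table.length : Int) + (a + 1)).toNat
        = ((table.length : Int) + a).toNat + 1 := by omega
    have h7 : (table[table.length - (-a).toNat]'(by omega) : List Int)
        = table[((table.length : Int) + a).toNat]'(by omega) := getElem_congr rfl h5 (by omega)
    rw [h7, h6, List.drop_eq_getElem_cons hN, List.take_succ_cons]

-- With block_length = 0 every loop of A is empty.
theorem pv_loop_zero (table : List (List Int)) (w : Nat) (perm : List Int) :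
    ∀ (dst : Nat) (out : List (List Int)), pvALoop table 0 w perm dst out = out := by
  induction perm with
  | nil => intro dst out; rfl
  | cons s rest ih =>
    intro dst out
    show pvALoop table 0 w rest (dst + 1) (pvBlockStep table 0 w dst s out) = out
    rw [ih]
    rfl

-- Multiplying a nonnegative Int by a Nat, in toNat.
theorem pv_toNat_mul (s : Int) (hs : 0 ≤ s) (bl : Nat) :
    (s * (bl : Int)).toNat = s.toNat * bl := by
  lift s to Nat using hs with m
  rw [← Nat.cast_mul, Int.toNat_natCast, Int.toNat_natCast]

-- B's row loop over range(a, a+k) collects the same drop/take block.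
theorem pv_map_range (table : List (List Int)) :
    ∀ (k : Nat) (a : Int), 0 ≤ a → a + (k : Int) ≤ (table.length : Int) →
    (PySem.List.pyRange a (a + (k : Int))).map (fun j => PySem.List.pyGetD table j [])
      = (table.drop a.toNat).take k := by
  intro k
  induction k with
  | zero =>
    intro a ha _
    have he : a + ((0 : Nat) : Int) = a := by push_cast; ring
    rw [he]
    have hr : PySem.List.pyRange a a = [] := by simp [PySem.List.pyRange]
    rw [hr]
    simp
  | succ k ih =>
    intro a ha hb
    have hlt : a < a + (((k : Nat) + 1 : Nat) : Int) := by push_cast; omega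
    rw [PySem.List.pyRange_one_cons hlt, List.map_cons]
    have haN : a.toNat < table.length := by push_cast at hb; omega
    rw [PySem.List.pyGetD_eq_getElem table [] ha (by omega)]
    have harg : a + (((k : Nat) + 1 : Nat) : Int) = (a + 1) + (k : Int) := by push_cast; ring
    rw [harg, ih (a + 1) (by omega) (by push_cast at hb ⊢; omega)]
    have h1 : (a + 1).toNat = a.toNat + 1 := by omega
    rw [h1, List.drop_eq_getElem_cons haN, List.take_succ_cons]

-- ===== VERDICT (by name: the statement is the Claim_ definition above) =====
theorem permute_sudoku_blocks_vertically_spec : Claim_equal_permute_sudoku_blocks_vertically := by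
  intro table perm _ hpre
  obtain ⟨htne, hpne, hrest⟩ := hpre
  unfold Spec_permute_sudoku_blocks_vertically
  set n := perm.length with hn
  set bl := table.length / n with hbl
  set w := (PySem.List.pyGetD table (0 : Int) []).length with hwdef
  have hA' : permute_sudoku_blocks_vertically table perm
      = pvALoop table bl w perm 0 (table.map (fun row => row)) := rfl
  have hB' : permute_sudoku_blocks_vertically_alt table perm
      = (PySem.List.pyRange ((n : Int) * (bl : Int)) (PySem.List.len table)).foldl
          (fun out row => out ++ [PySem.List.pyGetD table (row : Int) []])
          (perm.foldl (fun out src =>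
            (PySem.List.pyRange (src * (bl : Int)) ((src + 1) * (bl : Int))).foldl
              (fun out row => out ++ [PySem.List.pyGetD table (row : Int) []]) out) []) := rfl
  have hmap : table.map (fun row => row) = table := by simp
  rcases hrest with hbl0 | ⟨hrect, hall'⟩
  · -- block_length = 0: A's loops never run, B collects nothing plus the whole table
    rw [hA', hB', hmap, hbl0, pv_loop_zero]
    have hinner : ∀ (out : List (List Int)), ∀ src ∈ perm,
        (PySem.List.pyRange (src * (((0 : Nat) : Int))) ((src + 1) * (((0 : Nat) : Int)))).foldl
          (fun out row => out ++ [PySem.List.pyGetD table (row : Int) []]) out = out := by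
      intro out src _
      have e1 : src * (((0 : Nat) : Int)) = 0 := by simp
      have e2 : (src + 1) * (((0 : Nat) : Int)) = 0 := by simp
      rw [e1, e2]
      have hr : PySem.List.pyRange (0 : Int) (0 : Int) = [] := by simp [PySem.List.pyRange]
      rw [hr]
      rfl
    rw [PySem.List.foldl_congr_mem perm _ (fun out _ => out) [] hinner]
    have hfix : perm.foldl (fun (out : List (List Int)) (_ : Int) => out) [] = [] := by
      simp
    rw [hfix]
    have e3 : (n : Int) * (((0 : Nat) : Int)) = 0 := by simp
    rw [e3, PySem.List.foldl_append_singleton_eq_map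
      (fun row => PySem.List.pyGetD table (row : Int) []) _ []]
    rw [PySem.List.map_pyGetD_pyRange_zero table []]
    simp
  · -- every selected block (wrapped for negative entries) lies inside the table
    have hw : ∀ r ∈ table, r.length = w := by
      intro r hr
      rw [hwdef, hrect r hr]
      cases table with
      | nil => exact absurd rfl htne
      | cons t0 rest => simp [PySem.List.pyGetD_zero_cons]
    have hn1 : 1 ≤ n := by
      rw [hn]
      exact List.length_pos_of_ne_nil hpne
    have hnb : n * bl ≤ table.length := by
      have := Nat.div_mul_le_self table.length n
      calc n * bl = bl * n := Nat.mul_comm n bl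
        _ ≤ table.length := this
    have hspec := fun s hs => pv_start_spec table bl s (hall' s hs)
    have hA : pvALoop table bl w perm 0 (table.map (fun row => row))
        = [] ++ perm.flatMap (fun s => (table.drop (pvStart table.length bl s)).take bl)
            ++ table.drop ((0 + n) * bl) := by
      rw [hmap]
      have := pv_loop table bl w hw perm 0 [] (by simp) (by simpa using hnb)
        (fun s hs => (hspec s hs).1) (fun s hs => (hspec s hs).2)
      simpa using this
    have hinner : ∀ (out : List (List Int)), ∀ src ∈ perm,
        (PySem.List.pyRange (src * (bl : Int)) ((src + 1) * (bl : Int))).foldl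
          (fun out row => out ++ [PySem.List.pyGetD table (row : Int) []]) out
        = out ++ (table.drop (pvStart table.length bl src)).take bl := by
      intro out src hsmem
      rw [PySem.List.foldl_append_singleton_eq_map
        (fun row => PySem.List.pyGetD table (row : Int) []) _ out]
      have he : (src + 1) * (bl : Int) = src * (bl : Int) + (bl : Int) := by ring
      rcases hall' src hsmem with ⟨h0, hub⟩ | ⟨hneg, hwrap⟩
      · have hcast : src * (bl : Int) + (bl : Int) = (((src.toNat + 1) * bl : Nat) : Int) := by
          obtain ⟨m, rfl⟩ := Int.eq_ofNat_of_zero_le h0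
          simp only [Int.toNat_natCast]
          push_cast
          ring
        rw [he, pv_map_range table bl (src * (bl : Int)) (by positivity)
          (by rw [hcast]; exact_mod_cast hub)]
        have hst : pvStart table.length bl src = src.toNat * bl := by
          unfold pvStart; rw [if_pos h0]
        rw [pv_toNat_mul src h0 bl, hst]
      · have hX : src * (bl : Int) ≤ -(bl : Int) := by
          have := mul_le_mul_of_nonneg_right (show src ≤ -1 by omega)
            (show (0 : Int) ≤ (bl : Int) by positivity)
          simpa using this
        rw [he, pv_map_range_neg table bl (src * (bl : Int)) (by omega) hwrap]
        have hst : pvStart table.length bl src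
            = ((table.length : Int) + src * (bl : Int)).toNat := by
          unfold pvStart; rw [if_neg (by omega)]
        rw [hst]
    rw [hA', hB', hA]
    rw [PySem.List.foldl_congr_mem perm _
      (fun out src => out ++ (table.drop (pvStart table.length bl src)).take bl) [] hinner]
    rw [PySem.List.foldl_append_eq_flatMap
      (fun s => (table.drop (pvStart table.length bl s)).take bl) perm []]
    rw [PySem.List.foldl_append_singleton_eq_map
      (fun row => PySem.List.pyGetD table (row : Int) []) _ _]
    rw [PySem.List.map_pyGetD_pyRange table [] (by positivity)]
    have h4 : ((n : Int) * (bl : Int)).toNat = n * bl := by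
      rw [← Nat.cast_mul, Int.toNat_natCast]
    rw [h4]
    simp
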